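-- pv_equiv track=rewrite | github.com/amrfad/bioinformatics-notes | replication.py | symbol_array
-- ===== SOURCE A (Python) =====
-- def pattern_count(text: str, pattern: str):
--     """
--     Menghitung berapa kali suatu pola (pattern) muncul dalam teks (text).
--
--     Args:
--         text (str): Teks atau urutan yang akan dicari polanya.
--         pattern (str): Pola yang ingin dihitung kemunculannya.
--
--     Returns:
--         int: Jumlah kemunculan pola dalam teks.
--     """
--     count = 0
--     len_text = len(text)
--     len_pattern = len(pattern)
--     for i in range(len_text-len_pattern+1):
--         if text[i:i+len_pattern] == pattern:
--             count = count+1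
--     return count
--
-- def symbol_array(genome: str, symbol: str):
--     """
--     Menghitung jumlah kemunculan suatu simbol dalam setengah genom (half-genome)
--     untuk setiap posisi dalam genom.
--
--     Args:
--         genome (str): Genom atau urutan DNA yang akan dianalisis.
--         symbol (str): Simbol yang ingin dihitung kemunculannya.
--
--     Returns:
--         list: Daftar jumlah kemunculan simbol dalam setengah genom untuk setiap posisi.
--     """
--     n = len(genome)
--     extended_genome = genome + genome[0:n//2]
--     array = []
--     array.append(pattern_count(extended_genome[0:(n//2)], symbol))
--     for i in range(1, n):
--         count = array[i-1]
--         if extended_genome[i-1] == symbol: count -= 1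
--         if extended_genome[i+(n//2)-1] == symbol: count += 1
--         array.append(count)
--     return array
-- ===== SOURCE B (Python) =====
-- def symbol_array(genome, symbol):
--     n = len(genome)
--     h = n // 2
--     ext = genome + genome[:h]
--     m = len(symbol)
--     base = sum(1 for i in range(h - m + 1) if ext[i:i+m] == symbol)
--     # prefix table: P[k] = number of positions j < k with ext[j] == symbol
--     P = [0]
--     for ch in ext:
--         P.append(P[-1] + (1 if ch == symbol else 0))
--     return [base] + [base + P[i + h] - P[h] - P[i] for i in range(1, n)]
-- ===== Notes on version B (the rewrite author's own statement) =====
-- stated objective: alternative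
-- what changed: Replaces A's running incremental update (each entry derived from the previous one with two +-1 adjustments) by an explicit prefix-count table over the extended genome plus a closed-form indexed pass base + P[i+h] - P[h] - P[i].
import Mathlib
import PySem

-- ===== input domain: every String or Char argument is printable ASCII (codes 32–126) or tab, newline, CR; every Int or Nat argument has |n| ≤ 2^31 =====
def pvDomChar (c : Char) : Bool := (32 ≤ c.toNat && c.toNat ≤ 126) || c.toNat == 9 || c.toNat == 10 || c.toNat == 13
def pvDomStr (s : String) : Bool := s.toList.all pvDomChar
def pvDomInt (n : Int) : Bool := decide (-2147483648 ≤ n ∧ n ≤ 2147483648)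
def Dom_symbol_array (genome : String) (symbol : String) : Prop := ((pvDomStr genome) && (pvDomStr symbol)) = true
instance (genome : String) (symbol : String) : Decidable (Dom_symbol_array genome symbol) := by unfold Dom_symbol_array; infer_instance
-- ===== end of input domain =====

-- B replaces A's running incremental window update by an explicit prefix-count table
-- plus a closed-form indexed pass (objective: alternative decomposition, same asymptotic cost).

-- ===== PORT A =====
-- helper of A: pattern_count(text, pattern)
def pattern_count (text : List Char) (pattern : List Char) : Int :=
  let len_text : Int := text.length
  let len_pattern : Int := pattern.length
  (PySem.List.pyRange 0 (len_text - len_pattern + 1) 1).foldl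
    (fun count i =>
      if PySem.List.slice text (some i) (some (i + len_pattern)) = pattern then count + 1
      else count)
    0

-- ext[j] == symbol (a one-character slice compared with the whole symbol string);
-- the index j is always in range at A's call sites, so the `none` branch never fires.
def cmpAt (ext : List Char) (j : Int) (symbol : List Char) : Bool :=
  match PySem.List.pyGet? ext j with
  | some c => decide ([c] = symbol)
  | none => false

def symbol_array (genome : String) (symbol : String) : List Int :=
  let g := genome.toList
  let sym := symbol.toList
  let n : Int := g.length
  let extended_genome := g ++ PySem.List.slice g (some 0) (some (PySem.Int.floordiv n 2))
  let a0 := pattern_count (PySem.List.slice extended_genome (some 0) (some (PySem.Int.floordiv n 2))) sym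
  (PySem.List.pyRange 1 n 1).foldl
    (fun array i =>
      let count := PySem.List.pyGetD array (i - 1) 0   -- array[i-1]: always in range
      let count := if cmpAt extended_genome (i - 1) sym then count - 1 else count
      let count := if cmpAt extended_genome (i + PySem.Int.floordiv n 2 - 1) sym then count + 1 else count
      array ++ [count])
    [a0]

-- ===== PORT B =====
def symbol_array_alt (genome : String) (symbol : String) : List Int :=
  let g := genome.toList
  let sym := symbol.toList
  let n : Int := g.length
  let h := PySem.Int.floordiv n 2
  let ext := g ++ PySem.List.slice g (some 0) (some h)
  let m : Int := sym.length
  let base := ((PySem.List.pyRange 0 (h - m + 1) 1).map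
    (fun i => if PySem.List.slice ext (some i) (some (i + m)) = sym then (1:Int) else 0)).sum
  -- prefix table: P[k] = number of positions j < k with ext[j] == symbol; P[-1] is the last entry
  let P := ext.foldl
    (fun acc ch => acc ++ [PySem.List.pyGetD acc (-1) 0 + (if [ch] = sym then (1:Int) else 0)])
    [0]
  base :: (PySem.List.pyRange 1 n 1).map
    (fun i => base + PySem.List.pyGetD P (i + h) 0 - PySem.List.pyGetD P h 0 - PySem.List.pyGetD P i 0)

-- ===== PRECONDITION & SPEC =====
def Spec_symbol_array (genome : String) (symbol : String) (out : List Int) : Prop := out = symbol_array_alt genome symbol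
instance (genome : String) (symbol : String) (out : List Int) : Decidable (Spec_symbol_array genome symbol out) := by unfold Spec_symbol_array; infer_instance

-- ===== CLAIM (what is proved, stated in full; the proofs are below) =====
def Claim_equal_symbol_array : Prop := ∀ (genome : String) (symbol : String), Dom_symbol_array genome symbol → Spec_symbol_array genome symbol (symbol_array genome symbol)

-- ===== LEMMAS AND PROOFS =====

def pvCnt (ext sym : List Char) (k : ℕ) : Int :=
  ((ext.take k).countP (fun c => decide ([c] = sym)) : ℤ)

lemma pvCnt_succ (ext sym : List Char) (j : ℕ) (hj : j < ext.length) :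
    pvCnt ext sym (j + 1) = pvCnt ext sym j + (if [ext[j]] = sym then 1 else 0) := by
  unfold pvCnt
  rw [List.take_add_one, List.getElem?_eq_getElem hj]
  simp only [Option.toList_some, List.countP_append, List.countP_cons, List.countP_nil]
  split_ifs with h h2 <;> simp_all

def pvG (ext sym : List Char) (h : ℕ) (base : Int) (i : ℕ) : Int :=
  base + pvCnt ext sym (i + h) - pvCnt ext sym h - pvCnt ext sym i

lemma pvCnt_zero (ext sym : List Char) : pvCnt ext sym 0 = 0 := by
  simp [pvCnt]

lemma pvG_zero (ext sym : List Char) (h : ℕ) (base : Int) : pvG ext sym h base 0 = base := by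
  simp [pvG, pvCnt_zero]

lemma pvG_succ (ext sym : List Char) (h : ℕ) (base : Int) (k : ℕ)
    (h1 : k < ext.length) (h2 : k + h < ext.length) :
    pvG ext sym h base (k + 1)
      = pvG ext sym h base k + (if [ext[k + h]] = sym then 1 else 0)
        - (if [ext[k]] = sym then 1 else 0) := by
  unfold pvG
  rw [show k + 1 + h = (k + h) + 1 from by omega, pvCnt_succ ext sym (k+h) h2, pvCnt_succ ext sym k h1]
  ring

lemma pvPfold (ext sym : List Char) (l : List Char) (j : ℕ)
    (hj : j ≤ ext.length) (hl : l = ext.drop j) :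
    l.foldl
      (fun acc ch => acc ++ [PySem.List.pyGetD acc (-1) 0 + (if [ch] = sym then (1:Int) else 0)])
      ((List.range (j + 1)).map (pvCnt ext sym))
    = (List.range (ext.length + 1)).map (pvCnt ext sym) := by
  induction l generalizing j with
  | nil =>
    have : j = ext.length := by
      have := congrArg List.length hl; simp at this; omega
    simp [this]
  | cons c l' ih =>
    have hjlt : j < ext.length := by
      by_contra hc
      rw [List.drop_eq_nil_of_le (by omega)] at hl; exact (List.cons_ne_nil _ _) hl
    rw [List.drop_eq_getElem_cons hjlt] at hl
    obtain ⟨hc, hl'⟩ := List.cons.injEq .. ▸ hl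
    rw [List.foldl_cons]
    have hstep : (List.range (j + 1)).map (pvCnt ext sym)
        ++ [PySem.List.pyGetD ((List.range (j + 1)).map (pvCnt ext sym)) (-1) 0
            + (if [c] = sym then (1:Int) else 0)]
        = (List.range (j + 1 + 1)).map (pvCnt ext sym) := by
      rw [List.range_succ (n := j), List.map_append]
      simp only [List.map_cons, List.map_nil]
      rw [PySem.List.pyGetD_neg_one_append_singleton]
      rw [List.range_succ (n := j + 1), List.map_append, List.range_succ (n := j), List.map_append]
      simp only [List.map_cons, List.map_nil, List.append_assoc, List.singleton_append]
      simp [hc, pvCnt_succ ext sym j hjlt]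
    rw [hstep, ih (j + 1) (by omega) hl']

lemma pvBaseEq (ext sym : List Char) (h : ℕ) (hh : h ≤ ext.length) :
    pattern_count (ext.take h) sym
      = ((PySem.List.pyRange 0 ((h : Int) - (sym.length : Int) + 1) 1).map
          (fun i => if PySem.List.slice ext (some i) (some (i + (sym.length : Int))) = sym
                    then (1:Int) else 0)).sum := by
  simp only [pattern_count]
  have hlt : ((ext.take h).length : Int) = (h : Int) := by
    simp [List.length_take]; omega
  rw [hlt]
  have e1 := PySem.List.foldl_count_if
    (fun i => decide (PySem.List.slice (List.take h ext) (some i) (some (i + (sym.length : Int))) = sym))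
    (PySem.List.pyRange 0 ((h : Int) - (sym.length : Int) + 1) 1) 0
  have e2 := PySem.List.sum_map_ite_one_zero
    (fun i => decide (PySem.List.slice ext (some i) (some (i + (sym.length : Int))) = sym))
    (PySem.List.pyRange 0 ((h : Int) - (sym.length : Int) + 1) 1)
  simp only [decide_eq_true_eq] at e1 e2
  rw [e1, e2]
  simp only [zero_add, Nat.cast_inj]
  apply List.countP_congr
  intro x hx
  obtain ⟨hx0, hx1⟩ := PySem.List.mem_pyRange_one.mp hx
  obtain ⟨j, rfl⟩ : ∃ j : ℕ, x = (j : Int) := ⟨x.toNat, by omega⟩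
  have hjm : j + sym.length ≤ h := by omega
  rw [PySem.List.slice_natCast_add, PySem.List.slice_natCast_add]
  rw [List.drop_take, List.take_take]
  rw [show min sym.length (h - j) = sym.length from by omega]

lemma pvCmpAt (ext sym : List Char) (j : ℕ) (hj : j < ext.length) :
    cmpAt ext (j : Int) sym = decide ([ext[j]] = sym) := by
  unfold cmpAt
  rw [PySem.List.pyGet?_natCast, List.getElem?_eq_getElem hj]

lemma pvAloop (ext sym : List Char) (N h : ℕ) (hlen : ext.length = N + h) (base : Int)
    (k : ℕ) (hk1 : 1 ≤ k) (hkN : k ≤ N) :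
    (PySem.List.pyRange 1 (k : Int) 1).foldl
      (fun array i =>
        let count := PySem.List.pyGetD array (i - 1) 0
        let count := if cmpAt ext (i - 1) sym then count - 1 else count
        let count := if cmpAt ext (i + (h : Int) - 1) sym then count + 1 else count
        array ++ [count])
      [pvG ext sym h base 0]
    = (List.range k).map (pvG ext sym h base) := by
  induction k with
  | zero => omega
  | succ k ih =>
    rcases Nat.eq_zero_or_pos k with rfl | hk
    · simp [PySem.List.pyRange_one_eq_nil]
    · obtain ⟨k', rfl⟩ : ∃ k', k = k' + 1 := ⟨k - 1, by omega⟩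
      rw [show ((k' + 1 + 1 : ℕ) : Int) = ((k' + 1 : ℕ) : Int) + 1 from by push_cast; ring,
        PySem.List.pyRange_one_succ_right (by exact_mod_cast hk),
        List.foldl_append, ih (by omega) (by omega), List.foldl_cons, List.foldl_nil]
      have hi1 : ((k' + 1 : ℕ) : Int) - 1 = ((k' : ℕ) : Int) := by push_cast; ring
      have hi2 : ((k' + 1 : ℕ) : Int) + (h : Int) - 1 = ((k' + h : ℕ) : Int) := by push_cast; ring
      have hb1 : k' < ext.length := by omega
      have hb2 : k' + h < ext.length := by omega
      simp only [hi1, hi2, pvCmpAt ext sym k' hb1, pvCmpAt ext sym (k' + h) hb2,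
        PySem.List.pyGetD_natCast, PySem.List.getD_map_range _ _ _ _ (by omega : k' < k' + 1),
        decide_eq_true_eq]
      conv_rhs => rw [List.range_succ (n := k' + 1), List.map_append]
      simp only [List.map_cons, List.map_nil, List.append_cancel_left_eq, List.cons.injEq, and_true]
      rw [pvG_succ ext sym h base k' hb1 hb2]
      split_ifs <;> ring

lemma pvRangeOne (N : ℕ) :
    PySem.List.pyRange 1 (N : Int) 1 = (List.range (N - 1)).map (fun j => ((j + 1 : ℕ) : Int)) := by
  induction N with
  | zero => simp [PySem.List.pyRange_one_eq_nil]
  | succ n ih =>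
    rcases Nat.eq_zero_or_pos n with h | h
    · subst h; simp [PySem.List.pyRange_one_eq_nil]
    · have hcast : ((n + 1 : ℕ) : Int) = (n : Int) + 1 := by push_cast; ring
      rw [hcast, PySem.List.pyRange_one_succ_right (by exact_mod_cast h), ih]
      rw [show n + 1 - 1 = (n - 1) + 1 from by omega, List.range_succ, List.map_append]
      simp
      omega

-- ===== VERDICT (by name: the statement is the Claim_ definition above) =====
theorem symbol_array_spec : Claim_equal_symbol_array := by
  intro genome symbol _hdom
  unfold Spec_symbol_array symbol_array symbol_array_alt
  simp only []
  have hflo : PySem.Int.floordiv ((genome.toList.length : ℕ) : Int) 2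
      = ((genome.toList.length / 2 : ℕ) : Int) := by
    exact_mod_cast PySem.Int.floordiv_natCast genome.toList.length 2
  simp only [hflo, PySem.List.slice_zero_start, PySem.List.slice_to_natCast]
  set xs := genome.toList with hxs
  set sym := symbol.toList with hsym
  set N := xs.length with hN
  set h := N / 2 with hh
  set ext := xs ++ xs.take h with hext
  have hhN : h ≤ N := Nat.div_le_self N 2
  have hlen : ext.length = N + h := by
    simp [hext, List.length_take]
    omega
  have hbase := pvBaseEq ext sym h (by omega)
  set base := ((PySem.List.pyRange 0 ((h : Int) - (sym.length : Int) + 1) 1).map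
      (fun i => if PySem.List.slice ext (some i) (some (i + (sym.length : Int))) = sym
                then (1:Int) else 0)).sum with hbdef
  rw [hbase]
  have hP : ext.foldl
      (fun acc ch => acc ++ [PySem.List.pyGetD acc (-1) 0 + (if [ch] = sym then (1:Int) else 0)])
      [0]
      = (List.range (ext.length + 1)).map (pvCnt ext sym) := by
    have := pvPfold ext sym ext 0 (by omega) (by simp)
    simpa [pvCnt_zero] using this
  rw [hP]
  rcases Nat.eq_zero_or_pos N with hN0 | hN1
  · rw [hN0]
    simp [PySem.List.pyRange_one_eq_nil]
  · have hA := pvAloop ext sym N h hlen base N hN1 le_rfl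
    simp only [pvG_zero] at hA
    rw [hA, pvRangeOne N, List.map_map]
    conv_lhs => rw [show N = (N - 1) + 1 from by omega, List.range_succ_eq_map, List.map_cons,
      List.map_map]
    rw [pvG_zero]
    congr 1
    apply List.map_congr_left
    intro j hj
    have hjN : j < N - 1 := List.mem_range.mp hj
    simp only [Function.comp_apply]
    have c1 : ((j + 1 : ℕ) : Int) + (h : Int) = ((j + 1 + h : ℕ) : Int) := by push_cast; ring
    rw [c1, PySem.List.pyGetD_natCast, PySem.List.pyGetD_natCast, PySem.List.pyGetD_natCast,
      PySem.List.getD_map_range _ _ _ _ (by omega),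
      PySem.List.getD_map_range _ _ _ _ (by omega),
      PySem.List.getD_map_range _ _ _ _ (by omega)]
    simp [pvG, Nat.succ_eq_add_one]
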